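-- pv_equiv track=rewrite | github.com/rolandjansky/athena | Trigger/TrigTools/TrigByteStreamTools/bin/trigbs_dumpHLTContentInBS_run3.py | decodeTriggerBits
-- ===== SOURCE A (Python) =====
-- def decodeTriggerBits(words, num_sets, base=32):
--     assert len(words) % num_sets == 0
--     n_words_per_set = len(words) // num_sets
--     result = []
--     for iset in range(num_sets):
--         words_in_set = words[iset*n_words_per_set:(iset+1)*n_words_per_set]
--         bit_indices = []
--         for iw in range(len(words_in_set)):
--             bit_indices.extend([base*iw+i for i in range(base) if words_in_set[iw] & (1 << i)])
--         result.append(bit_indices)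
--     return result
-- ===== SOURCE B (Python) =====
-- def decodeTriggerBits(words, num_sets, base=32):
--     assert len(words) % num_sets == 0
--     n = len(words) // num_sets
--     mask = (1 << base) - 1 if base > 0 else 0
--     result = []
--     for iset in range(num_sets):
--         bits = []
--         for iw in range(n):
--             w = words[iset * n + iw] & mask
--             while w:
--                 low = w ^ (w & (w - 1))          # isolate lowest set bit
--                 bits.append(base * iw + low.bit_length() - 1)
--                 w &= w - 1                       # clear it
--             # enumerates only the set bits, in ascending order
--         result.append(bits)
--     return result
-- ===== Notes on version B (the rewrite author's own statement) =====
-- stated objective: alternative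
-- what changed: A scans every bit position 0..base-1 of every word with a mask test; B masks each word to its low base bits once and then enumerates only the set bits with a clear-lowest-set-bit loop (w &= w-1), reading each index off via bit_length, and indexes the flat list instead of slicing per set.
-- outside the precondition, e.g. on decodeTriggerBits([1, 2], 0, 32): A raises ZeroDivisionError, B raises ZeroDivisionError; on decodeTriggerBits([1, 2, 3], 2, 32): A raises AssertionError, B raises AssertionError
import Mathlib
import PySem

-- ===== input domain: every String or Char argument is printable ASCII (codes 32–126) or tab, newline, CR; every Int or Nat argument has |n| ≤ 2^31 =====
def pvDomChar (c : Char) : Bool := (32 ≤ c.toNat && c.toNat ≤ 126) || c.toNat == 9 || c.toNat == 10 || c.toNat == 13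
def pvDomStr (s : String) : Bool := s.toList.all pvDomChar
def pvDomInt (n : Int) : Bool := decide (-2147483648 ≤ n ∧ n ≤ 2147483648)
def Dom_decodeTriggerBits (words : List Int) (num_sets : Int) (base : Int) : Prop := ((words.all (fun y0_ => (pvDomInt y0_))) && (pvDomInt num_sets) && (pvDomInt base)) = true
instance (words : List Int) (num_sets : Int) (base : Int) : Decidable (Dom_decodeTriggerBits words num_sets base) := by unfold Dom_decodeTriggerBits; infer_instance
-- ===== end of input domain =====

-- B replaces A's per-word scan of every bit position 0..base-1 by a clear-lowest-set-bit
-- loop that visits only the set bits of each (masked) word. Equivalence of RETURN values.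

-- ===== PORT A =====
def decodeTriggerBits (words : List Int) (num_sets : Int) (base : Int) : List (List Int) :=
  -- n_words_per_set = len(words) // num_sets   (assert handled by Pre_)
  let n := PySem.Int.floordiv (PySem.List.len words) num_sets
  (PySem.List.pyRange 0 num_sets 1).foldl (fun result iset =>
    let words_in_set := PySem.List.slice words (some (iset * n)) (some ((iset + 1) * n))
    let bit_indices :=
      (PySem.List.pyRange 0 (PySem.List.len words_in_set) 1).foldl (fun acc iw =>
        acc ++ ((PySem.List.pyRange 0 base 1).filter
                  (fun i => PySem.Int.band (PySem.List.pyGetD words_in_set iw 0) ((1 : Int) <<< i.toNat) != 0)).map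
                 (fun i => base * iw + i)) []
    result ++ [bit_indices]) []

-- ===== PORT B =====
-- the 'while w:' loop of Source B; 'while w' on the reachable (masked, hence nonnegative)
-- states is 'while 0 < w', which makes the recursion total
def popBits (base iw : Int) (w : Int) : List Int :=
  if h : 0 < w then
    -- low = w ^ (w & (w - 1)); bits.append(base*iw + low.bit_length() - 1); w &= w - 1
    (base * iw + ((PySem.Int.bitLength (PySem.Int.bxor w (PySem.Int.band w (w - 1))) : Int) - 1)) ::
      popBits base iw (PySem.Int.band w (w - 1))
  else []
  termination_by w.toNat
  decreasing_by
    have hw : w = ((w.toNat : Int)) := by omega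
    rw [hw]
    have h1 : (w.toNat : Int) - 1 = (((w.toNat - 1 : Nat) : Int)) := by omega
    rw [h1, PySem.Int.band_natCast]
    have := Nat.and_le_right (n := w.toNat) (m := w.toNat - 1)
    simp only [Int.toNat_natCast]
    omega

def decodeTriggerBits_alt (words : List Int) (num_sets : Int) (base : Int) : List (List Int) :=
  let n := PySem.Int.floordiv (PySem.List.len words) num_sets
  let mask : Int := if base > 0 then (1 : Int) <<< base.toNat - 1 else 0
  (PySem.List.pyRange 0 num_sets 1).foldl (fun result iset =>
    let bits :=
      (PySem.List.pyRange 0 n 1).foldl (fun acc iw =>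
        acc ++ popBits base iw (PySem.Int.band (PySem.List.pyGetD words (iset * n + iw) 0) mask)) []
    result ++ [bits]) []

-- ===== PRECONDITION & SPEC =====
-- Pre_ excludes exactly the inputs where A raises: num_sets = 0 (ZeroDivisionError in
-- len(words) % num_sets) and len(words) % num_sets ≠ 0 (AssertionError).
def Pre_decodeTriggerBits (words : List Int) (num_sets : Int) (base : Int) : Prop :=
  num_sets ≠ 0 ∧ PySem.Int.mod (PySem.List.len words) num_sets = 0
instance (words : List Int) (num_sets : Int) (base : Int) : Decidable (Pre_decodeTriggerBits words num_sets base) := by unfold Pre_decodeTriggerBits; infer_instance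

def pvWitness_decodeTriggerBits : List Int × Int × Int := ([5, -3, 0, 6], 2, 3)

def Spec_decodeTriggerBits (words : List Int) (num_sets : Int) (base : Int) (out : List (List Int)) : Prop := out = decodeTriggerBits_alt words num_sets base
instance (words : List Int) (num_sets : Int) (base : Int) (out : List (List Int)) : Decidable (Spec_decodeTriggerBits words num_sets base out) := by unfold Spec_decodeTriggerBits; infer_instance

-- ===== CLAIM (what is proved, stated in full; the proofs are below) =====
def Claim_equal_decodeTriggerBits : Prop := ∀ (words : List Int) (num_sets : Int) (base : Int), Dom_decodeTriggerBits words num_sets base → Pre_decodeTriggerBits words num_sets base → Spec_decodeTriggerBits words num_sets base (decodeTriggerBits words num_sets base)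

-- ===== LEMMAS AND PROOFS =====

-- ---- generic Nat bit facts ----

lemma div2_testBit (x i : Nat) : (x / 2).testBit i = x.testBit (i + 1) :=
  (Nat.testBit_succ x i).symm

lemma mod2_eq (x : Nat) : x % 2 = if x.testBit 0 then 1 else 0 := by
  have h := Nat.testBit_zero x
  rcases Nat.mod_two_eq_zero_or_one x with h2 | h2 <;> rw [h2] at h <;> simp at h <;>
    simp [h2]

lemma ldiff_div_two (m n : Nat) : (m.ldiff n) / 2 = (m / 2).ldiff (n / 2) := by
  apply Nat.eq_of_testBit_eq
  intro i
  simp [div2_testBit, Nat.testBit_ldiff]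

-- m - (m &&& n) clears from m exactly the bits shared with n
lemma sub_and_eq_ldiff (m n : Nat) : m - (m &&& n) = m.ldiff n := by
  induction m using Nat.strong_induction_on generalizing n with
  | _ m IH =>
    rcases Nat.eq_zero_or_pos m with hm | hm
    · subst hm
      have : Nat.ldiff 0 n = 0 := by
        apply Nat.eq_of_testBit_eq; intro i; simp [Nat.testBit_ldiff]
      simp [this]
    · have hlt : m / 2 < m := Nat.div_lt_self hm (by norm_num)
      have ih := IH (m / 2) hlt (n / 2)
      have ha : (m &&& n) / 2 = (m / 2) &&& (n / 2) := Nat.and_div_two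
      have hl : (m.ldiff n) / 2 = (m / 2).ldiff (n / 2) := ldiff_div_two m n
      have ham : (m &&& n) % 2 = if m.testBit 0 && n.testBit 0 then 1 else 0 := by
        rw [mod2_eq, Nat.testBit_and]
      have hlm : (m.ldiff n) % 2 = if m.testBit 0 && !n.testBit 0 then 1 else 0 := by
        rw [mod2_eq, Nat.testBit_ldiff]
      have hmm : m % 2 = if m.testBit 0 then 1 else 0 := mod2_eq m
      have hand_le : (m / 2) &&& (n / 2) ≤ m / 2 := Nat.and_le_left
      have hA : m &&& n = 2 * ((m / 2) &&& (n / 2)) + (m &&& n) % 2 := by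
        have := Nat.div_add_mod (m &&& n) 2
        omega
      have hL : m.ldiff n = 2 * ((m / 2).ldiff (n / 2)) + (m.ldiff n) % 2 := by
        have := Nat.div_add_mod (m.ldiff n) 2
        omega
      have hM : m = 2 * (m / 2) + m % 2 := by omega
      have hsum : m % 2 = (m &&& n) % 2 + (m.ldiff n) % 2 := by
        rw [ham, hlm, hmm]
        rcases m.testBit 0 <;> rcases n.testBit 0 <;> simp
      have hle : (m &&& n) % 2 ≤ m % 2 := by
        rw [ham, hmm]
        rcases m.testBit 0 <;> rcases n.testBit 0 <;> simp
      omega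

lemma and_pred_lt (m : Nat) (hm : m ≠ 0) : m &&& (m - 1) < m :=
  lt_of_le_of_lt (Nat.and_le_right) (by omega)

lemma xor_and_pred_ne (m : Nat) (hm : m ≠ 0) : m ^^^ (m &&& (m - 1)) ≠ 0 := by
  have := and_pred_lt m hm
  intro h
  have : m = m &&& (m - 1) := by
    have := Nat.xor_eq_zero_iff.mp h
    omega
  omega

lemma two_mul_testBit_zero (x : Nat) : (2 * x).testBit 0 = false := by
  simp [Nat.testBit_zero, Nat.mul_mod_right]

lemma two_mul_testBit_succ (x i : Nat) : (2 * x).testBit (i + 1) = x.testBit i := by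
  rw [← div2_testBit]
  congr 1
  omega

-- the even/odd step identities of the clear-lowest-bit loop
lemma and_pred_two_mul (q : Nat) (_hq : q ≠ 0) :
    (2 * q) &&& (2 * q - 1) = 2 * (q &&& (q - 1)) := by
  apply Nat.eq_of_testBit_eq
  intro i
  cases i with
  | zero =>
    simp
  | succ i =>
    have h1 : (2 * q - 1) / 2 = q - 1 := by omega
    rw [Nat.testBit_and, two_mul_testBit_succ, ← div2_testBit (2 * q - 1) i, h1,
      two_mul_testBit_succ, Nat.testBit_and]

lemma two_mul_xor (x y : Nat) : (2 * x) ^^^ (2 * y) = 2 * (x ^^^ y) := by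
  apply Nat.eq_of_testBit_eq
  intro i
  cases i with
  | zero => simp
  | succ i => rw [Nat.testBit_xor, two_mul_testBit_succ, two_mul_testBit_succ,
      two_mul_testBit_succ, Nat.testBit_xor]

lemma and_two_mul_add_one (q : Nat) : (2 * q + 1) &&& (2 * q) = 2 * q := by
  apply Nat.eq_of_testBit_eq
  intro i
  cases i with
  | zero => simp
  | succ i =>
    have h1 : (2 * q + 1) / 2 = q := by omega
    rw [Nat.testBit_and, ← div2_testBit (2 * q + 1) i, h1, two_mul_testBit_succ]
    simp

lemma xor_two_mul_add_one (q : Nat) : (2 * q + 1) ^^^ (2 * q) = 1 := by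
  apply Nat.eq_of_testBit_eq
  intro i
  cases i with
  | zero =>
    simp [Nat.testBit_zero]
  | succ i =>
    have h1 : (2 * q + 1) / 2 = q := by omega
    rw [Nat.testBit_xor, ← div2_testBit (2 * q + 1) i, h1, two_mul_testBit_succ]
    simp [Nat.testBit_succ]

-- ---- bitLength facts ----

lemma bitLength_pos (x : Nat) (hx : x ≠ 0) : 1 ≤ PySem.Int.bitLength (x : Int) := by
  rw [PySem.Int.bitLength_natCast (by omega)]
  omega

lemma bitLength_two_mul (x : Nat) (hx : x ≠ 0) :
    PySem.Int.bitLength ((2 * x : Nat) : Int) = PySem.Int.bitLength (x : Int) + 1 := by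
  rw [PySem.Int.bitLength_natCast (by omega)]
  congr 2
  omega

-- ---- the Nat shadow of Source B's while loop ----

def bitIdxs (m : Nat) : List Nat :=
  if hm : m = 0 then [] else
    (PySem.Int.bitLength ((m ^^^ (m &&& (m - 1)) : Nat) : Int) - 1) :: bitIdxs (m &&& (m - 1))
  termination_by m
  decreasing_by exact and_pred_lt m hm

lemma popBits_eq_map (b iw : Int) (m : Nat) :
    popBits b iw (m : Int) = (bitIdxs m).map (fun t : Nat => b * iw + (t : Int)) := by
  induction m using Nat.strong_induction_on with
  | _ m IH =>
    rcases Nat.eq_zero_or_pos m with hm | hm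
    · subst hm
      rw [popBits, bitIdxs]
      norm_num
    · have hsub : ((m : Int)) - 1 = (((m - 1 : Nat)) : Int) := by omega
      rw [popBits, bitIdxs]
      have hpos : (0 : Int) < (m : Int) := by exact_mod_cast hm
      rw [dif_pos hpos, dif_neg (by omega : ¬ m = 0)]
      rw [hsub, PySem.Int.band_natCast, PySem.Int.bxor_natCast]
      have hbl := bitLength_pos (m ^^^ (m &&& (m - 1))) (xor_and_pred_ne m (by omega))
      rw [List.map_cons, IH (m &&& (m - 1)) (and_pred_lt m (by omega))]
      congr 1
      push_cast [Nat.cast_sub hbl]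
      ring

lemma bitIdxs_two_mul (q : Nat) : bitIdxs (2 * q) = (bitIdxs q).map (· + 1) := by
  induction q using Nat.strong_induction_on with
  | _ q IH =>
    rcases Nat.eq_zero_or_pos q with hq | hq
    · subst hq
      rw [bitIdxs]
      simp
    · have hq0 : q ≠ 0 := by omega
      conv_lhs => rw [bitIdxs]
      conv_rhs => rw [bitIdxs]
      rw [dif_neg (by omega : ¬ 2 * q = 0), dif_neg hq0]
      rw [and_pred_two_mul q hq0]
      have hx : (2 * q) ^^^ (2 * (q &&& (q - 1))) = 2 * (q ^^^ (q &&& (q - 1))) :=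
        two_mul_xor q (q &&& (q - 1))
      rw [hx, bitLength_two_mul _ (xor_and_pred_ne q hq0)]
      rw [List.map_cons, IH (q &&& (q - 1)) (and_pred_lt q hq0)]
      have hbl := bitLength_pos (q ^^^ (q &&& (q - 1))) (xor_and_pred_ne q hq0)
      congr 1
      omega

lemma bitIdxs_two_mul_add_one (q : Nat) : bitIdxs (2 * q + 1) = 0 :: bitIdxs (2 * q) := by
  conv_lhs => rw [bitIdxs]
  rw [dif_neg (by omega : ¬ 2 * q + 1 = 0)]
  have h1 : 2 * q + 1 - 1 = 2 * q := by omega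
  rw [h1, and_two_mul_add_one, xor_two_mul_add_one]
  have h2 : PySem.Int.bitLength (1 : Int) = 1 := by
    have h3 := PySem.Int.bitLength_natCast (m := 1) (by omega)
    simpa using h3
  simp [h2]

-- bitIdxs enumerates exactly the set-bit positions, in ascending order
lemma bitIdxs_filter : ∀ (bN : Nat) (m : Nat), m < 2 ^ bN →
    bitIdxs m = (List.range bN).filter m.testBit := by
  intro bN
  induction bN with
  | zero =>
    intro m hm
    have : m = 0 := by simpa using hm
    subst this
    rw [bitIdxs]
    simp
  | succ bN IH =>
    intro m hm
    have hq : m / 2 < 2 ^ bN := by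
      have : (2:Nat) ^ (bN + 1) = 2 * 2 ^ bN := by ring
      omega
    have hrange : List.range (bN + 1) = 0 :: (List.range bN).map Nat.succ :=
      List.range_succ_eq_map
    rcases Nat.even_or_odd m with he | ho
    · obtain ⟨q, hqe⟩ := he
      have hqe' : m = 2 * q := by omega
      subst hqe'
      have hq' : q < 2 ^ bN := by omega
      have hfun : (Nat.testBit (2 * q) ∘ Nat.succ) = q.testBit := by
        funext j
        simp only [Function.comp_apply, Nat.succ_eq_add_one]
        exact two_mul_testBit_succ q j
      rw [bitIdxs_two_mul, IH q hq', hrange, List.filter_cons, List.filter_map, hfun,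
        two_mul_testBit_zero]
      simp
    · obtain ⟨q, hqo⟩ := ho
      subst hqo
      have hq' : q < 2 ^ bN := by omega
      have hfun : (Nat.testBit (2 * q + 1) ∘ Nat.succ) = q.testBit := by
        funext j
        simp only [Function.comp_apply, Nat.succ_eq_add_one]
        rw [← div2_testBit]
        congr 1
        omega
      have ht0 : (2 * q + 1).testBit 0 = true := by
        simp [Nat.testBit_zero]
      rw [bitIdxs_two_mul_add_one, bitIdxs_two_mul, IH q hq', hrange, List.filter_cons,
        List.filter_map, hfun, ht0]
      simp

-- ---- the masked word as a Nat, bit by bit ----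

lemma band_nonneg_right (w : Int) (M : Nat) : 0 ≤ PySem.Int.band w (M : Int) := by
  unfold PySem.Int.band
  split_ifs <;> omega

lemma band_pos_toNat (w : Int) (hw : 0 ≤ w) (M : Nat) :
    (PySem.Int.band w (M : Int)).toNat = w.toNat &&& M := by
  have h : PySem.Int.band w (M : Int) = ((w.toNat &&& M : Nat) : Int) := by
    conv_lhs => rw [show w = ((w.toNat : Int)) from by omega]
    rw [PySem.Int.band_natCast]
  rw [h, Int.toNat_natCast]

lemma band_neg_toNat (w : Int) (hw : w < 0) (M : Nat) :
    (PySem.Int.band w (M : Int)).toNat = M - (M &&& (-w - 1).toNat) := by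
  unfold PySem.Int.band
  rw [if_neg (by omega), if_pos (by omega : (0:Int) ≤ (M : Int))]
  simp

lemma maskNat_lt (w : Int) (b : Nat) :
    (PySem.Int.band w (((2 ^ b - 1 : Nat)) : Int)).toNat < 2 ^ b := by
  have hp : 0 < 2 ^ b := Nat.two_pow_pos b
  rcases (by omega : 0 ≤ w ∨ w < 0) with hw | hw
  · rw [band_pos_toNat w hw]
    have := Nat.and_le_right (n := w.toNat) (m := 2 ^ b - 1)
    omega
  · rw [band_neg_toNat w hw]
    omega

lemma maskNat_testBit (w : Int) (b k : Nat) (hk : k < b) :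
    ((PySem.Int.band w (((2 ^ b - 1 : Nat)) : Int)).toNat).testBit k
      = (PySem.Int.band w ((1 : Int) <<< (k : Int)) != 0) := by
  have hsh : ((1 : Int) <<< (k : Int)) = ((2 ^ k : Nat) : Int) := by
    rw [Int.shiftLeft_natCast_right, Int.shiftLeft_eq]
    push_cast
    ring
  rw [hsh]
  rcases (by omega : 0 ≤ w ∨ w < 0) with hw | hw
  · rw [band_pos_toNat w hw]
    conv_rhs => rw [show w = ((w.toNat : Int)) from by omega]
    rw [PySem.Int.band_natCast]
    rw [Nat.testBit_land, Nat.testBit_two_pow_sub_one]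
    have h2 := Nat.and_two_pow w.toNat k
    rcases hb : w.toNat.testBit k <;> rw [hb] at h2 <;>
      simp [h2, hk]
  · rw [band_neg_toNat w hw, sub_and_eq_ldiff, Nat.testBit_ldiff,
      Nat.testBit_two_pow_sub_one]
    unfold PySem.Int.band
    rw [if_neg (by omega), if_pos (Int.natCast_nonneg _)]
    simp only [Int.toNat_natCast]
    rw [Nat.land_comm (2 ^ k) (-w - 1).toNat]
    have h2 := Nat.and_two_pow (-w - 1).toNat k
    have hp := Nat.two_pow_pos k
    rcases hb : (-w - 1).toNat.testBit k <;> rw [hb] at h2 <;> rw [h2] <;>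
      simp [hk]

-- ---- per-word equality: A's bit scan = B's clear-lowest-bit loop ----

lemma word_eq (b iw w : Int) :
    ((PySem.List.pyRange 0 b 1).filter
        (fun i => PySem.Int.band w ((1 : Int) <<< i.toNat) != 0)).map (fun i => b * iw + i)
      = popBits b iw (PySem.Int.band w (if b > 0 then (1 : Int) <<< b.toNat - 1 else 0)) := by
  rcases (by omega : b ≤ 0 ∨ 0 < b) with hb | hb
  · rw [if_neg (by omega), PySem.Int.band_zero, PySem.List.pyRange_one_eq_nil hb, popBits]
    simp
  · have h1 : (1 : Nat) ≤ 2 ^ b.toNat := Nat.one_le_two_pow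
    have hmask : (if b > 0 then (1 : Int) <<< b.toNat - 1 else 0)
        = (((2 ^ b.toNat - 1 : Nat)) : Int) := by
      rw [if_pos hb, Int.shiftLeft_eq]
      push_cast [h1]
      ring
    rw [hmask]
    have hband : PySem.Int.band w (((2 ^ b.toNat - 1 : Nat)) : Int)
        = (((PySem.Int.band w (((2 ^ b.toNat - 1 : Nat)) : Int)).toNat : Nat) : Int) :=
      (Int.toNat_of_nonneg (band_nonneg_right _ _)).symm
    rw [hband, popBits_eq_map, bitIdxs_filter b.toNat _ (maskNat_lt w b.toNat)]
    rw [PySem.List.pyRange_one]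
    have hb0 : (b - 0).toNat = b.toNat := by omega
    rw [hb0]
    have hpred : ∀ k ∈ List.range b.toNat,
        ((fun i => PySem.Int.band w ((1 : Int) <<< i.toNat) != 0) ∘
          (fun k : Nat => (0 : Int) + (k : Int))) k
        = (PySem.Int.band w (((2 ^ b.toNat - 1 : Nat)) : Int)).toNat.testBit k := by
      intro k hk
      have hkb : k < b.toNat := List.mem_range.mp hk
      simp only [Function.comp_apply]
      have ht : ((0 : Int) + (k : Int)).toNat = k := by omega
      rw [ht]
      exact (maskNat_testBit w b.toNat k hkb).symm
    rw [List.filter_map, List.filter_congr hpred, List.map_map]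
    have hfun : ((fun i => b * iw + i) ∘ (fun k : Nat => (0 : Int) + (k : Int)))
        = (fun t : Nat => b * iw + (t : Int)) := by
      funext k
      simp
    rw [hfun]

-- ===== VERDICT (by name: the statement is the Claim_ definition above) =====
theorem decodeTriggerBits_spec : Claim_equal_decodeTriggerBits := by
  intro words num_sets base hdom hpre
  obtain ⟨hns, hmod⟩ := hpre
  unfold Spec_decodeTriggerBits
  simp only [decodeTriggerBits, decodeTriggerBits_alt]
  apply PySem.List.foldl_congr_mem
  intro acc iset hiset
  obtain ⟨hi0, hi1⟩ := PySem.List.mem_pyRange_one.mp hiset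
  congr 1
  -- per-set lists
  set n : Int := PySem.Int.floordiv (PySem.List.len words) num_sets with hn
  have hLn : n * num_sets = (words.length : Int) := by
    have h := PySem.Int.floordiv_mul_add_mod (PySem.List.len words) num_sets
    rw [hmod, PySem.List.len_eq] at h
    simpa [hn] using h
  have hns' : 0 < num_sets := by omega
  have hn0 : 0 ≤ n := by nlinarith [Int.natCast_nonneg words.length]
  have hP0 : 0 ≤ iset * n := mul_nonneg hi0 hn0
  have hP1 : iset * n + n ≤ (words.length : Int) := by nlinarith
  have hQ0 : 0 ≤ (iset + 1) * n := by nlinarith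
  -- the slice is a drop/take of length n
  have hslice : PySem.List.slice words (some (iset * n)) (some ((iset + 1) * n))
      = List.take n.toNat (List.drop (iset * n).toNat words) := by
    rw [PySem.List.slice_toNat words hP0 hQ0]
    have hexp : (iset + 1) * n = iset * n + n := by ring
    congr 1
    omega
  have hlen : (List.take n.toNat (List.drop (iset * n).toNat words)).length = n.toNat := by
    simp
    omega
  rw [hslice]
  have hlenI : PySem.List.len (List.take n.toNat (List.drop (iset * n).toNat words)) = n := by
    rw [PySem.List.len_eq, hlen]
    omega
  rw [hlenI]
  congr 1
  apply PySem.List.foldl_congr_mem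
  intro acc2 iw hiw
  obtain ⟨hw0, hw1⟩ := PySem.List.mem_pyRange_one.mp hiw
  congr 1
  -- per-word lists: identify the two word lookups, then apply word_eq
  have hword : PySem.List.pyGetD (List.take n.toNat (List.drop (iset * n).toNat words)) iw 0
      = PySem.List.pyGetD words (iset * n + iw) 0 := by
    rw [PySem.List.pyGetD_eq_getElem _ _ hw0 (by rw [hlen]; omega),
        PySem.List.pyGetD_eq_getElem _ _ (by omega) (by omega)]
    rw [List.getElem_take, List.getElem_drop]
    congr 1
    omega
  rw [hword]
  exact word_eq base iw (PySem.List.pyGetD words (iset * n + iw) 0)
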